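-- pv_equiv track=rewrite | github.com/Jonahkivindu/study-pro-app | app_v2.py | offline_rag_search
-- ===== SOURCE A (Python) =====
-- def offline_rag_search(query, context):
--     """Local, offline, lightweight RAG implementation using keyword overlap."""
--     if not context: return "No transcript available."
--     query_words = set([w.strip('()?,.!') for w in query.lower().split() if len(w) > 3])
--     if not query_words: return "Please enter a more specific question."
--
--     sentences = [s.strip() + "." for s in context.split(".") if len(s.strip()) > 10]
--     scored = []
--
--     for s in sentences:
--         s_words = set([w.strip('()?,.!') for w in s.lower().split()])
--         score = len(query_words.intersection(s_words))
--         if score > 0: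
--             scored.append((score, s))
--
--     if scored:
--         scored.sort(reverse=True, key=lambda x: x[0])
--         best = [s for _, s in scored[:4]]  # Top 4 sentences
--         return " ".join(best)
--     return "I couldn't find direct information regarding that in the lecture context."
-- ===== SOURCE B (Python) =====
-- def offline_rag_search(query, context):
--     """Local, offline, lightweight RAG implementation using keyword overlap."""
--     if not context: return "No transcript available."
--     query_words = set([w.strip('()?,.!') for w in query.lower().split() if len(w) > 3])
--     if not query_words: return "Please enter a more specific question."
--
--     # Single streaming pass: keep only a bounded buffer of the 4 best
--     # (score, sentence) pairs seen so far, in descending score order, stable.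
--     top = []
--     for raw in context.split("."):
--         t = raw.strip()
--         if len(t) > 10:
--             s = t + "."
--             s_words = set([w.strip('()?,.!') for w in s.lower().split()])
--             score = len(query_words.intersection(s_words))
--             if score > 0:
--                 i = 0
--                 while i < len(top) and top[i][0] >= score:
--                     i += 1
--                 top.insert(i, (score, s))
--                 del top[4:]
--
--     if top:
--         return " ".join(s for _, s in top)
--     return "I couldn't find direct information regarding that in the lecture context."
-- ===== Notes on version B (the rewrite author's own statement) =====
-- stated objective: alternative
-- what changed: B never builds or sorts the full scored list: a single streaming pass keeps a bounded 4-element buffer of the best (score, sentence) pairs, inserting each matching sentence by a stable positional scan and truncating to 4, so selection is online partial selection instead of A's collect-then-sort-then-slice.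
import Mathlib
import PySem

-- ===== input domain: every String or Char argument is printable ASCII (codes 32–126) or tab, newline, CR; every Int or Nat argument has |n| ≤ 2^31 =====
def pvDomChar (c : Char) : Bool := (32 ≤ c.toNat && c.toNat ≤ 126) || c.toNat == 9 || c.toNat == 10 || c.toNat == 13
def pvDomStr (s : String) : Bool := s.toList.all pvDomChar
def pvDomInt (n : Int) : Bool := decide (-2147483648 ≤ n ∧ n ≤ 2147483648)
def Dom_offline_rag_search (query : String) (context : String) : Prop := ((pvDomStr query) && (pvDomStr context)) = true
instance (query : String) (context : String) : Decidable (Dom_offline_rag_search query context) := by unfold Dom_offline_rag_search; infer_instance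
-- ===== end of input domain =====

-- B replaces A's collect-all-then-sort-then-take-4 selection by a single streaming pass that
-- maintains a bounded buffer of at most 4 best (score, sentence) pairs; objective: alternative.

-- ===== PORT A =====
-- shared first lines of both Pythons: query-word set, word set of a sentence, overlap score
def pvQueryWords (query : String) : PySem.Set String :=
  PySem.Set.ofList (((PySem.Str.split₀ (PySem.Str.lower query)).filter
      (fun w => (3 : Int) < PySem.Str.len w)).map (fun w => PySem.Str.stripChars w "()?,.!"))

def pvWordSet (s : String) : PySem.Set String :=
  PySem.Set.ofList ((PySem.Str.split₀ (PySem.Str.lower s)).map (fun w => PySem.Str.stripChars w "()?,.!"))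

def pvScore (qw : PySem.Set String) (s : String) : Int :=
  ((PySem.Set.inter qw (pvWordSet s) : List String).length : Int)

-- s.strip() + "." (String.ofList keeps the concatenation kernel-transparent)
def pvDot (s : String) : String := String.ofList (s.toList ++ ['.'])

-- the sentence comprehension: [s.strip() + "." for s in context.split(".") if len(s.strip()) > 10]
-- (split? never returns none here since the separator "." is nonempty; getD [] is exact)
def pvSentences (context : String) : List String :=
  (((PySem.Str.split? context ".").getD []).filter
      (fun s => (10 : Int) < PySem.Str.len (PySem.Str.strip s))).map
    (fun s => pvDot (PySem.Str.strip s))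

def offline_rag_search (query : String) (context : String) : String :=
  if context = "" then "No transcript available." else
  let query_words := pvQueryWords query
  if query_words.isEmpty then "Please enter a more specific question." else
  let sentences := pvSentences context
  let scored := sentences.foldl (fun acc s =>
      let score := pvScore query_words s
      if 0 < score then acc ++ [(score, s)] else acc) ([] : List (Int × String))
  if scored ≠ [] then
    PySem.Str.join " " (((PySem.List.sorted scored (fun x => x.1) true).take 4).map (fun x => x.2))
  else "I couldn't find direct information regarding that in the lecture context."

-- ===== PORT B =====
-- Source B's positional while-loop + insert: walk past every kept pair with score ≥ the new one
-- (stable among equal scores), place the pair there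
def pvInsertTop (p : Int × String) : List (Int × String) → List (Int × String)
  | [] => [p]
  | q :: t => if p.1 ≤ q.1 then q :: pvInsertTop p t else p :: q :: t

def offline_rag_search_alt (query : String) (context : String) : String :=
  if context = "" then "No transcript available." else
  let query_words := pvQueryWords query
  if query_words.isEmpty then "Please enter a more specific question." else
  let top := ((PySem.Str.split? context ".").getD []).foldl (fun top raw =>
      let t := PySem.Str.strip raw
      if (10 : Int) < PySem.Str.len t then
        let s := pvDot t
        let score := pvScore query_words s
        if 0 < score then (pvInsertTop (score, s) top).take 4 else top
      else top) ([] : List (Int × String))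
  if top ≠ [] then
    PySem.Str.join " " (top.map (fun x => x.2))
  else "I couldn't find direct information regarding that in the lecture context."

-- ===== PRECONDITION & SPEC =====
def Spec_offline_rag_search (query : String) (context : String) (out : String) : Prop := out = offline_rag_search_alt query context
instance (query : String) (context : String) (out : String) : Decidable (Spec_offline_rag_search query context out) := by unfold Spec_offline_rag_search; infer_instance

-- ===== CLAIM (what is proved, stated in full; the proofs are below) =====
def Claim_equal_offline_rag_search : Prop := ∀ (query : String) (context : String), Dom_offline_rag_search query context → Spec_offline_rag_search query context (offline_rag_search query context)

-- ===== LEMMAS AND PROOFS =====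

-- A's scored list in filter/map form
def pvScored (qw : PySem.Set String) (sentences : List String) : List (Int × String) :=
  (sentences.filter (fun s => decide (0 < pvScore qw s))).map (fun s => (pvScore qw s, s))

lemma pvScored_cons (qw : PySem.Set String) (s : String) (l : List String) :
    pvScored qw (s :: l)
      = (if 0 < pvScore qw s then [(pvScore qw s, s)] else []) ++ pvScored qw l := by
  by_cases h : 0 < pvScore qw s <;> simp [pvScored, h]

lemma scored_foldl (qw : PySem.Set String) (l : List String) (acc : List (Int × String)) :
    l.foldl (fun acc s => let score := pvScore qw s;
        if 0 < score then acc ++ [(score, s)] else acc) acc = acc ++ pvScored qw l := by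
  induction l generalizing acc with
  | nil => simp [pvScored]
  | cons s t ih =>
    simp only [List.foldl_cons, pvScored_cons, ih]
    by_cases h : 0 < pvScore qw s
    · simp only [if_pos h, List.append_assoc, List.singleton_append]
    · simp only [if_neg h, List.nil_append]

-- B's fold over raw pieces is the bounded-insert fold over A's scored pairs
lemma top_foldl (qw : PySem.Set String) (pieces : List String) (acc : List (Int × String)) :
    pieces.foldl (fun top raw =>
        let t := PySem.Str.strip raw
        if (10 : Int) < PySem.Str.len t then
          let s := pvDot t
          let score := pvScore qw s
          if 0 < score then (pvInsertTop (score, s) top).take 4 else top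
        else top) acc
      = (pvScored qw ((pieces.filter (fun s => (10 : Int) < PySem.Str.len (PySem.Str.strip s))).map
          (fun s => pvDot (PySem.Str.strip s)))).foldl
          (fun top p => (pvInsertTop p top).take 4) acc := by
  induction pieces generalizing acc with
  | nil => simp [pvScored]
  | cons raw t ih =>
    simp only [List.foldl_cons, List.filter_cons]
    by_cases h10 : (10 : Int) < PySem.Str.len (PySem.Str.strip raw)
    · simp only [h10, decide_true, if_true, List.map_cons, pvScored_cons]
      by_cases hs : 0 < pvScore qw (pvDot (PySem.Str.strip raw))
      · simp only [if_pos hs, List.singleton_append, List.foldl_cons, ih]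
      · simp only [if_neg hs, List.nil_append, ih]
    · simp only [h10, decide_false, Bool.false_eq_true, if_false, ih]

-- Source B's positional insertion is the stable descending insertBy of A's sort
lemma insertTop_eq_insertBy (p : Int × String) (l : List (Int × String)) :
    pvInsertTop p l = PySem.List.insertBy (fun a b => decide (b.1 < a.1)) p l := by
  induction l with
  | nil => rfl
  | cons q t ih =>
    simp only [pvInsertTop, PySem.List.insertBy]
    by_cases h : p.1 ≤ q.1
    · have : ¬ (q.1 < p.1) := by omega
      simp [h, this, ih]
    · have : q.1 < p.1 := by omega
      simp [h, this]

-- truncation commutes with insertion: inserting then cutting to k equals cutting first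
lemma take_insertBy (before : (Int × String) → (Int × String) → Bool) (x : Int × String)
    (l : List (Int × String)) (k : Nat) :
    (PySem.List.insertBy before x l).take k
      = (PySem.List.insertBy before x (l.take k)).take k := by
  induction l generalizing k with
  | nil => simp
  | cons y t ih =>
    cases k with
    | zero => simp
    | succ k' =>
      simp only [PySem.List.insertBy, List.take_succ_cons]
      by_cases h : before x y = true
      · simp [h]
        cases k' with
        | zero => simp
        | succ k'' =>
          simp only [List.take_succ_cons, List.cons.injEq, true_and]
          rw [List.take_take]
          simp
      · simp only [h, Bool.false_eq_true, if_false, List.take_succ_cons, List.cons.injEq, true_and]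
        exact ih k'


-- the full sort-then-take-4 equals the streaming bounded fold
lemma take_foldl_insert (l : List (Int × String)) (acc : List (Int × String)) :
    (l.foldl (fun acc x => PySem.List.insertBy (fun a b => decide (b.1 < a.1)) x acc) acc).take 4
      = l.foldl (fun top p => (pvInsertTop p top).take 4) (acc.take 4) := by
  induction l generalizing acc with
  | nil => simp
  | cons x t ih =>
    simp only [List.foldl_cons, ih, insertTop_eq_insertBy]
    congr 1
    rw [← take_insertBy]

lemma sorted_take_eq_stream (l : List (Int × String)) :
    ((PySem.List.sorted l (fun x => x.1) true).take 4)
      = l.foldl (fun top p => (pvInsertTop p top).take 4) [] := by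
  rw [PySem.List.sorted_rev_eq_foldl_insertBy]
  simpa using take_foldl_insert l []

-- the buffer is empty exactly when no sentence matched
lemma stream_ne_nil (l : List (Int × String)) (h : l ≠ []) :
    l.foldl (fun top p => (pvInsertTop p top).take 4) [] ≠ [] := by
  rw [← sorted_take_eq_stream]
  intro hc
  have hnil : PySem.List.sorted l (fun x => x.1) true = [] := by
    cases hs : PySem.List.sorted l (fun x => x.1) true with
    | nil => rfl
    | cons a t => rw [hs] at hc; simp at hc
  exact h ((PySem.List.sorted_eq_nil_iff _ _ _).mp hnil)

-- ===== VERDICT (by name: the statement is the Claim_ definition above) =====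
theorem offline_rag_search_spec : Claim_equal_offline_rag_search := by
  intro query context _
  unfold Spec_offline_rag_search offline_rag_search offline_rag_search_alt pvSentences
  by_cases hc : context = ""
  · simp [hc]
  · simp only [hc, if_false]
    by_cases hq : (pvQueryWords query).isEmpty
    · simp [hq]
    · simp only [hq, Bool.false_eq_true, if_false]
      rw [scored_foldl, top_foldl, List.nil_append]
      set qw := pvQueryWords query with hqw
      set scored := pvScored qw ((((PySem.Str.split? context ".").getD []).filter
          (fun s => (10 : Int) < PySem.Str.len (PySem.Str.strip s))).map
          (fun s => pvDot (PySem.Str.strip s))) with hscored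
      by_cases hs : scored = []
      · simp [hs]
      · have hne := stream_ne_nil scored hs
        simp only [ne_eq, hs, hne, not_false_eq_true, if_true]
        rw [sorted_take_eq_stream]
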